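-- pv_equiv track=rewrite | github.com/chika1072/step-program | week1/homework2.py | word_in_line
-- ===== SOURCE A (Python) =====
-- from collections import Counter
--
-- def word_in_line(word, line):
--     for chr in set(word):
--         if chr not in set(line):
--             return False
--     # wordに含まれる全ての文字がlineにも含まれていたら、
--     # (文字のwordに含まれる数) <= (文字のlineに含まれる数) を確認する
--     counter_word = Counter(word)
--     counter_line = Counter(line)
--     for chr in counter_word:
--         if counter_word[chr] > counter_line.get(chr, 0):
--             return False
--     return True
-- ===== SOURCE B (Python) =====
-- def word_in_line(word, line):
--     sw = sorted(word)
--     sl = sorted(line)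
--     j = 0
--     n = len(sl)
--     for c in sw:
--         while j < n and sl[j] < c:
--             j += 1
--         if j == n or sl[j] != c:
--             return False
--         j += 1
--     return True
-- ===== Notes on version B (the rewrite author's own statement) =====
-- stated objective: alternative
-- what changed: Replaces the set-membership pass plus two Counter tables with sorting both strings and a single two-pointer merge that checks multiset containment.
import Mathlib
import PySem

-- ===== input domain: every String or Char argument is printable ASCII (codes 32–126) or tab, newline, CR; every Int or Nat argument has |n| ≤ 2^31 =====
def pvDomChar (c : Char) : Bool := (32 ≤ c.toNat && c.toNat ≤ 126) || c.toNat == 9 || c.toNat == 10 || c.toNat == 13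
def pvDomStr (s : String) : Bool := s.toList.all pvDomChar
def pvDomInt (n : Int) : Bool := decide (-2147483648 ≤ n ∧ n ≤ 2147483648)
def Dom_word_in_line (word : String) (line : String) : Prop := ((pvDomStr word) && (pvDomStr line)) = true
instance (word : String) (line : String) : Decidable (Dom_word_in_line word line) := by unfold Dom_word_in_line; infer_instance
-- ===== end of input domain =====

-- B replaces A's set pass + two Counter tables by sorting both strings and one two-pointer merge (alternative decomposition, same result).

-- ===== PORT A =====
-- for chr in set(word): if chr not in set(line): return False
def wilLoop1 (sl : PySem.Set Char) : List Char → Bool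
  | [] => true
  | c :: cs => if PySem.Set.contains sl c then wilLoop1 sl cs else false

-- for chr in counter_word: if counter_word[chr] > counter_line.get(chr, 0): return False
def wilLoop2 (cw cl : PySem.Dict Char Int) : List Char → Bool
  | [] => true
  | c :: cs => if cw.getD c 0 > cl.getD c 0 then false else wilLoop2 cw cl cs

def word_in_line (word : String) (line : String) : Bool :=
  if wilLoop1 (PySem.Set.ofList line.toList) (PySem.Set.ofList word.toList) then
    let counter_word := PySem.Dict.counter word.toList
    let counter_line := PySem.Dict.counter line.toList
    wilLoop2 counter_word counter_line counter_word.keys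
  else false

-- ===== PORT B =====
-- the for-loop over sorted(word) with inner while advancing j over sorted(line)
def wilMerge : List Char → List Char → Bool
  | [], _ => true
  | _ :: _, [] => false
  | c :: ws, d :: ls =>
    if d < c then wilMerge (c :: ws) ls
    else if d = c then wilMerge ws ls
    else false
termination_by ws ls => ws.length + ls.length

def word_in_line_alt (word : String) (line : String) : Bool :=
  wilMerge (PySem.List.sorted word.toList (fun x => x) false)
           (PySem.List.sorted line.toList (fun x => x) false)

-- ===== PRECONDITION & SPEC =====
def Spec_word_in_line (word : String) (line : String) (out : Bool) : Prop := out = word_in_line_alt word line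
instance (word : String) (line : String) (out : Bool) : Decidable (Spec_word_in_line word line out) := by unfold Spec_word_in_line; infer_instance

-- ===== CLAIM (what is proved, stated in full; the proofs are below) =====
def Claim_equal_word_in_line : Prop := ∀ (word : String) (line : String), Dom_word_in_line word line → Spec_word_in_line word line (word_in_line word line)

-- ===== LEMMAS AND PROOFS =====

theorem wilLoop1_iff (sl : PySem.Set Char) (cs : List Char) :
    wilLoop1 sl cs = true ↔ ∀ c ∈ cs, c ∈ sl := by
  induction cs with
  | nil => simp [wilLoop1]
  | cons c cs ih =>
    simp only [wilLoop1, PySem.Set.contains]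
    by_cases h : c ∈ sl <;> simp [h, ih]

theorem wilLoop2_iff (cw cl : PySem.Dict Char Int) (cs : List Char) :
    wilLoop2 cw cl cs = true ↔ ∀ c ∈ cs, cw.getD c 0 ≤ cl.getD c 0 := by
  induction cs with
  | nil => simp [wilLoop2]
  | cons c cs ih =>
    simp only [wilLoop2]
    by_cases h : cw.getD c 0 > cl.getD c 0
    · simp only [if_pos h]
      constructor
      · intro habs; exact absurd habs (by simp)
      · intro habs; exact absurd (habs c (by simp)) (not_le.mpr h)
    · simp only [if_neg h, ih]
      constructor
      · intro hh x hx
        rcases List.mem_cons.mp hx with rfl | hx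
        · omega
        · exact hh x hx
      · intro hh x hx; exact hh x (List.mem_cons_of_mem _ hx)

/-- A computes exactly multiset containment (subperm of the character lists). -/
theorem word_in_line_iff (word line : String) :
    word_in_line word line = true ↔ List.Subperm word.toList line.toList := by
  rw [List.subperm_ext_iff]
  unfold word_in_line
  by_cases h1 : wilLoop1 (PySem.Set.ofList line.toList) (PySem.Set.ofList word.toList) = true
  · rw [if_pos h1, wilLoop2_iff]
    simp only [PySem.Dict.keys_counter, PySem.Dict.getD_counter]
    constructor
    · intro h c hc
      have := h c (by rw [PySem.Set.mem_ofList]; exact hc)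
      exact_mod_cast this
    · intro h c hc
      rw [PySem.Set.mem_ofList] at hc
      exact_mod_cast h c hc
  · rw [if_neg h1]
    simp only [Bool.false_eq_true, false_iff]
    intro hcnt
    apply h1
    rw [wilLoop1_iff]
    intro c hc
    rw [PySem.Set.mem_ofList] at hc ⊢
    have h1 : 1 ≤ word.toList.count c := List.one_le_count_iff.mpr hc
    have := hcnt c hc
    exact List.one_le_count_iff.mp (le_trans h1 this)

/-- The two-pointer merge on sorted lists decides subperm. -/
theorem wilMerge_iff : ∀ (ls ws : List Char), ws.Pairwise (· ≤ ·) → ls.Pairwise (· ≤ ·) →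
    (wilMerge ws ls = true ↔ List.Subperm ws ls) := by
  intro ls
  induction ls with
  | nil =>
    intro ws _ _
    cases ws with
    | nil => simp [wilMerge]
    | cons w ws' => simp [wilMerge]
  | cons l ls' ih =>
    intro ws hws hls
    cases ws with
    | nil => simp [wilMerge, List.nil_subperm]
    | cons w ws' =>
      simp only [wilMerge]
      by_cases hlt : l < w
      · rw [if_pos hlt, ih (w :: ws') hws (List.Pairwise.of_cons hls)]
        rw [List.subperm_ext_iff, List.subperm_ext_iff]
        constructor
        · intro h x hx
          have hc := h x hx
          calc (w :: ws').count x ≤ ls'.count x := hc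
            _ ≤ (l :: ls').count x := by rw [List.count_cons]; split <;> omega
        · intro h x hx
          have hc := h x hx
          have hxl : x ≠ l := by
            rcases List.mem_cons.mp hx with rfl | hx
            · exact fun he => absurd (he ▸ hlt) (lt_irrefl _)
            · have hwx : w ≤ x := (List.pairwise_cons.mp hws).1 x hx
              exact fun he => absurd (he ▸ (lt_of_lt_of_le hlt hwx)) (lt_irrefl _)
          rwa [List.count_cons_of_ne (Ne.symm hxl)] at hc
      · rw [if_neg hlt]
        by_cases heq : l = w
        · subst heq
          rw [if_pos rfl, ih ws' (List.Pairwise.of_cons hws) (List.Pairwise.of_cons hls)]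
          exact (List.subperm_cons l).symm
        · rw [if_neg heq]
          have hwl : w < l := lt_of_le_of_ne (le_of_not_gt hlt) (fun he => heq he.symm)
          simp only [Bool.false_eq_true, false_iff]
          intro hsub
          have hmem : w ∈ l :: ls' := hsub.subset (by simp)
          rcases List.mem_cons.mp hmem with hm | hm
          · exact absurd hwl (by rw [hm]; exact lt_irrefl l)
          · have hlw : l ≤ w := (List.pairwise_cons.mp hls).1 w hm
            exact absurd (lt_of_lt_of_le hwl hlw) (lt_irrefl _)

theorem word_in_line_alt_iff (word line : String) :
    word_in_line_alt word line = true ↔ List.Subperm word.toList line.toList := by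
  unfold word_in_line_alt
  have pw : (PySem.List.sorted word.toList (fun x => x) false).Pairwise (· ≤ ·) := by
    simpa using PySem.List.sorted_pairwise word.toList (fun x => x)
  have pl : (PySem.List.sorted line.toList (fun x => x) false).Pairwise (· ≤ ·) := by
    simpa using PySem.List.sorted_pairwise line.toList (fun x => x)
  rw [wilMerge_iff _ _ pw pl]
  constructor
  · intro h
    exact ((PySem.List.sorted_perm word.toList (fun x => x) false).subperm_right).mp
      (((PySem.List.sorted_perm line.toList (fun x => x) false).subperm_left).mp h)
  · intro h
    exact ((PySem.List.sorted_perm line.toList (fun x => x) false).subperm_left).mpr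
      (((PySem.List.sorted_perm word.toList (fun x => x) false).subperm_right).mpr h)

-- ===== VERDICT (by name: the statement is the Claim_ definition above) =====
theorem word_in_line_spec : Claim_equal_word_in_line := by
  intro word line _
  unfold Spec_word_in_line
  have h1 := word_in_line_iff word line
  have h2 := word_in_line_alt_iff word line
  cases hA : word_in_line word line <;> cases hB : word_in_line_alt word line <;> simp_all
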